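-- pv_equiv track=rewrite | github.com/Nikku03/enzyme_Software | nexus/physics/pga_math.py | _blade_sign_pga
-- ===== SOURCE A (Python) =====
-- def _blade_sign_pga(mask_a: int, mask_b: int) -> int:
--     """Anticommutation sign of canonical_blade(mask_a) × canonical_blade(mask_b).
--
--     Counts, for each basis vector in mask_a, how many lower-indexed
--     basis vectors from mask_b must be passed over (each swap → sign flip).
--     The metric for G(3,0,1) contributes +1 for shared e1/e2/e3 bits and 0
--     for shared e0 bits (null); the null case is handled before calling this.
--     """
--     sign = 1
--     for bit in range(4):
--         if (mask_a >> bit) & 1: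
--             lower = mask_b & ((1 << bit) - 1)
--             if bin(lower).count("1") % 2 == 1:
--                 sign = -sign
--     return sign
-- ===== SOURCE B (Python) =====
-- def _blade_sign_pga(mask_a: int, mask_b: int) -> int:
--     """Anticommutation sign of canonical_blade(mask_a) x canonical_blade(mask_b)."""
--     a = mask_a & 0xF
--     swaps = 0
--     while a > 0:
--         a >>= 1
--         swaps += bin(a & mask_b).count("1")
--     return -1 if swaps % 2 else 1
-- ===== Notes on version B (the rewrite author's own statement) =====
-- stated objective: alternative
-- what changed: B replaces A's outer loop over the four bits of mask_a (with a per-bit lower-mask popcount and a sign flip) by a single swap accumulator: it shifts the masked low nibble of mask_a rightwards, summing the popcount of its overlap with mask_b, and takes the parity once at the end.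
import Mathlib
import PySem

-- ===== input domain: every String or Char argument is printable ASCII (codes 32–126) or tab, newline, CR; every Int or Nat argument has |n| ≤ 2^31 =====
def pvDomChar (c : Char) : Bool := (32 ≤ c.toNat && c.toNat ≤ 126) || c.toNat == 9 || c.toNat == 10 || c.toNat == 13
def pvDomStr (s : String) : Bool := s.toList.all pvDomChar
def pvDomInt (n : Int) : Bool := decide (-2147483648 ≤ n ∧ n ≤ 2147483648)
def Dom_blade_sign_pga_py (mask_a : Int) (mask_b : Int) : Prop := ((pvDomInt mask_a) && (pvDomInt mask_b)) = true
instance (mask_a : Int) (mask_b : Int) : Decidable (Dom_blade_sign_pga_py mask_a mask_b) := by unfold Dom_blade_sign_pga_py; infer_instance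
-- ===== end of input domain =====

-- B replaces A's per-bit sign-flipping loop by a single swap accumulator: it shifts the low
-- nibble of mask_a rightwards, summing the popcount of its overlap with mask_b, and takes the
-- parity once at the end (objective: alternative decomposition, same cost).

-- ===== PORT A =====
-- port of bin(n).count("1") for n ≥ 0 (both Pythons use it); the first Nat is a fuel
-- guard making the halving recursion structural — fuel n always suffices, so it is exact
def pvBinOnes : Nat → Nat → Nat
  | _, 0 => 0
  | 0, _ => 0
  | fuel+1, n => n % 2 + pvBinOnes fuel (n / 2)

def pvPopcount (n : Nat) : Nat := pvBinOnes n n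

-- literal transliteration of A: for bit in range(4): if (mask_a >> bit) & 1: …
def blade_sign_pga_py (mask_a : Int) (mask_b : Int) : Int :=
  (List.range 4).foldl
    (fun sign bit =>
      if Int.land (Int.shiftRight mask_a bit) 1 ≠ 0 then   -- (mask_a >> bit) & 1 (truthiness)
        let lower := Int.land mask_b (Int.shiftLeft 1 bit - 1)   -- mask_b & ((1 << bit) - 1)
        if pvPopcount lower.toNat % 2 = 1 then -sign else sign   -- lower ≥ 0 here, toNat exact
      else sign)
    1

-- ===== PORT B =====
-- the while-loop of B; the Nat is a fuel guard (fuel = a.toNat always suffices, loop halves a)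
def pvLoopB (mask_b : Int) : Nat → Int → Int → Int
  | fuel+1, a, swaps =>
      if a > 0 then
        pvLoopB mask_b fuel (Int.shiftRight a 1)
          (swaps + (pvPopcount (Int.land (Int.shiftRight a 1) mask_b).toNat : Int))
      else if swaps % 2 ≠ 0 then -1 else 1
  | 0, _, swaps => if swaps % 2 ≠ 0 then -1 else 1

def blade_sign_pga_py_alt (mask_a : Int) (mask_b : Int) : Int :=
  pvLoopB mask_b (Int.land mask_a 15).toNat (Int.land mask_a 15) 0   -- a = mask_a & 0xF

-- ===== PRECONDITION & SPEC =====
def Spec_blade_sign_pga_py (mask_a : Int) (mask_b : Int) (out : Int) : Prop := out = blade_sign_pga_py_alt mask_a mask_b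
instance (mask_a : Int) (mask_b : Int) (out : Int) : Decidable (Spec_blade_sign_pga_py mask_a mask_b out) := by unfold Spec_blade_sign_pga_py; infer_instance

-- ===== CLAIM (what is proved, stated in full; the proofs are below) =====
def Claim_equal_blade_sign_pga_py : Prop := ∀ (mask_a : Int) (mask_b : Int), Dom_blade_sign_pga_py mask_a mask_b → Spec_blade_sign_pga_py mask_a mask_b (blade_sign_pga_py mask_a mask_b)

-- ===== LEMMAS AND PROOFS =====

theorem pv_negSucc_ediv (n m : Nat) (h : 0 < m) :
    Int.negSucc n / (m : Int) = Int.negSucc (n / m) := by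
  have hq : n = m * (n / m) + n % m := (Nat.div_add_mod n m).symm
  have hr : n % m < m := Nat.mod_lt n h
  have e : Int.negSucc n = (m : Int) - 1 - (n % m : Nat)
      + (m : Int) * (-((n / m : Nat) : Int) - 1) := by
    rw [Int.negSucc_eq]; nth_rewrite 1 [hq]; push_cast; ring
  rw [e, Int.add_mul_ediv_left _ _ (by omega : (m:Int) ≠ 0),
    Int.ediv_eq_zero_of_lt (by omega) (by omega), Int.negSucc_eq]
  ring

theorem pv_shiftRight_eq_div (x : Int) (k : Nat) : Int.shiftRight x k = x / ((2:Int)^k) := by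
  have h2 : (2:Int)^k = ((2^k : Nat) : Int) := by push_cast; ring
  cases x with
  | ofNat n =>
    show (Int.ofNat (n >>> k)) = _
    rw [Nat.shiftRight_eq_div_pow, h2]
    exact Int.natCast_ediv n (2^k)
  | negSucc n =>
    show (Int.negSucc (n >>> k)) = _
    rw [Nat.shiftRight_eq_div_pow, h2, pv_negSucc_ediv n (2^k) (by positivity)]

theorem pv_negSucc_emod (n m : Nat) (h : 0 < m) :
    Int.negSucc n % (m : Int) = ((m - 1 - n % m : Nat) : Int) := by
  have hq : n = m * (n / m) + n % m := (Nat.div_add_mod n m).symm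
  have hr : n % m < m := Nat.mod_lt n h
  have hc : ((m - 1 - n % m : Nat) : Int) = (m:Int) - 1 - ((n % m : Nat) : Int) := by omega
  have e : Int.negSucc n = ((m - 1 - n % m : Nat) : Int)
      + (m : Int) * (-((n / m : Nat) : Int) - 1) := by
    rw [Int.negSucc_eq, hc]; nth_rewrite 1 [hq]; push_cast; ring
  rw [e, Int.add_mul_emod_self_left, Int.emod_eq_of_lt (by omega) (by omega)]

theorem pv_ldiff_mask (n k : Nat) : (2^k - 1).ldiff n = 2^k - 1 - n % 2^k := by
  have hr : n % 2^k < 2^k := Nat.mod_lt n (by positivity)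
  apply Nat.eq_of_testBit_eq
  intro i
  rw [show 2^k - 1 - n % 2^k = 2^k - (n % 2^k + 1) by omega]
  rw [Nat.testBit_ldiff, Nat.testBit_two_pow_sub_succ hr,
    show 2^k - 1 = 2^k - (0 + 1) by omega, Nat.testBit_two_pow_sub_succ (by positivity),
    Nat.testBit_mod_two_pow]
  by_cases hi : i < k <;> simp [hi]

theorem pv_and_mod (n m k : Nat) (h : n < 2^k) : n &&& m = n &&& (m % 2^k) := by
  apply Nat.eq_of_testBit_eq
  intro i
  rw [Nat.testBit_and, Nat.testBit_and, Nat.testBit_mod_two_pow]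
  by_cases hi : i < k
  · simp [hi]
  · have : n.testBit i = false :=
      Nat.testBit_lt_two_pow (lt_of_lt_of_le h (Nat.pow_le_pow_right (by omega) (by omega)))
    simp [this]

theorem pv_ldiff_eq_and (n m k : Nat) (h : n < 2^k) :
    n.ldiff m = n &&& (2^k - 1 - m % 2^k) := by
  have hr : m % 2^k < 2^k := Nat.mod_lt m (by positivity)
  apply Nat.eq_of_testBit_eq
  intro i
  rw [show 2^k - 1 - m % 2^k = 2^k - (m % 2^k + 1) by omega]
  rw [Nat.testBit_ldiff, Nat.testBit_and, Nat.testBit_two_pow_sub_succ hr,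
    Nat.testBit_mod_two_pow]
  by_cases hi : i < k
  · simp [hi]
  · have : n.testBit i = false :=
      Nat.testBit_lt_two_pow (lt_of_lt_of_le h (Nat.pow_le_pow_right (by omega) (by omega)))
    simp [this]

theorem pv_land_mask (x : Int) (k : Nat) :
    Int.land x (((2^k - 1 : Nat) : Int)) = x % ((2:Int)^k) := by
  have h2 : (2:Int)^k = ((2^k : Nat) : Int) := by push_cast; ring
  cases x with
  | ofNat n =>
    show (((n &&& (2^k - 1) : Nat)) : Int) = ((n : Nat) : Int) % ((2:Int)^k)
    rw [Nat.and_two_pow_sub_one_eq_mod, h2]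
    exact (Int.natCast_emod n (2^k)).symm
  | negSucc n =>
    show ((((2^k - 1).ldiff n : Nat)) : Int) = Int.negSucc n % ((2:Int)^k)
    rw [pv_ldiff_mask, h2, pv_negSucc_emod n (2^k) (by positivity)]

theorem pv_land_small (a y : Int) (k : Nat) (h0 : 0 ≤ a) (h1 : a < (2:Int)^k) :
    Int.land a y = Int.land a (y % ((2:Int)^k)) := by
  have h2 : (2:Int)^k = ((2^k : Nat) : Int) := by push_cast; ring
  cases a with
  | negSucc n => exact absurd h0 (by rw [Int.negSucc_eq]; omega)
  | ofNat n =>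
    have hn : n < 2^k := by
      rw [h2] at h1
      have h1' : ((n : Nat) : Int) < ((2^k : Nat) : Int) := h1
      exact_mod_cast h1'
    cases y with
    | ofNat m =>
      show (((n &&& m : Nat)) : Int) = Int.land (↑n) ((↑m) % ((2:Int)^k))
      rw [h2, show ((m:Int) % (((2^k : Nat)) : Int)) = ((m % 2^k : Nat) : Int) from
        (Int.natCast_emod m (2^k)).symm]
      show (((n &&& m : Nat)) : Int) = (((n &&& (m % 2^k) : Nat)) : Int)
      rw [pv_and_mod n m k hn]
    | negSucc m =>
      show (((n.ldiff m : Nat)) : Int) = Int.land (↑n) (Int.negSucc m % ((2:Int)^k))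
      rw [h2, pv_negSucc_emod m (2^k) (by positivity)]
      show (((n.ldiff m : Nat)) : Int) = (((n &&& (2^k - 1 - m % 2^k) : Nat)) : Int)
      rw [pv_ldiff_eq_and n m k hn]

theorem pv_A_res (x y : Int) :
    blade_sign_pga_py x y = blade_sign_pga_py (x % 16) (y % 8) := by
  have hc : ∀ k : Nat, k < 4 →
      Int.land (Int.shiftRight x k) 1 = Int.land (Int.shiftRight (x % 16) k) 1 := by
    intro k hk
    rw [pv_shiftRight_eq_div, pv_shiftRight_eq_div,
      show (1:Int) = ((2^1 - 1 : Nat) : Int) by norm_num, pv_land_mask, pv_land_mask]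
    interval_cases k <;> norm_num <;> omega
  have hsl : ∀ k : Nat, Int.shiftLeft 1 k - 1 = ((2^k - 1 : Nat) : Int) := by
    intro k
    show (Int.ofNat (1 <<< k)) - 1 = _
    rw [Nat.shiftLeft_eq]
    have : (Int.ofNat (1 * 2^k)) = ((2^k : Nat) : Int) := by norm_num
    rw [this]
    have h1 : 1 ≤ 2^k := Nat.one_le_two_pow
    omega
  have hl : ∀ k : Nat, k < 4 →
      Int.land y (Int.shiftLeft 1 k - 1) = Int.land (y % 8) (Int.shiftLeft 1 k - 1) := by
    intro k hk
    rw [hsl, pv_land_mask, pv_land_mask]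
    interval_cases k <;> norm_num
  simp only [blade_sign_pga_py, show List.range 4 = [0,1,2,3] from rfl,
    List.foldl_cons, List.foldl_nil]
  rw [hc 0 (by omega), hc 1 (by omega), hc 2 (by omega), hc 3 (by omega),
    hl 0 (by omega), hl 1 (by omega), hl 2 (by omega), hl 3 (by omega)]

theorem pv_loopB_res (y : Int) : ∀ (fuel : Nat) (a s : Int), 0 ≤ a → a < 16 →
    pvLoopB y fuel a s = pvLoopB (y % 8) fuel a s := by
  intro fuel
  induction fuel with
  | zero => intro a s _ _; rfl
  | succ f ih =>
    intro a s h0 h1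
    simp only [pvLoopB]
    by_cases ha : a > 0
    · simp only [ha, if_pos]
      rw [pv_shiftRight_eq_div a 1, show ((2:Int)^1) = 2 by norm_num]
      rw [pv_land_small (a / 2) y 3 (by omega) (by norm_num; omega),
        show ((2:Int)^3) = 8 by norm_num]
      exact ih (a / 2) _ (by omega) (by omega)
    · simp only [ha, if_neg, not_false_iff]
theorem pv_B_res (x y : Int) :
    blade_sign_pga_py_alt x y = blade_sign_pga_py_alt (x % 16) (y % 8) := by
  simp only [blade_sign_pga_py_alt]
  rw [show (15:Int) = ((2^4 - 1 : Nat) : Int) by norm_num, pv_land_mask, pv_land_mask,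
    show ((2:Int)^4) = 16 by norm_num, Int.emod_emod_of_dvd x (dvd_refl 16)]
  exact pv_loopB_res y _ (x % 16) 0 (by omega) (by omega)

theorem pv_key : ∀ r ∈ List.range 16, ∀ s ∈ List.range 8,
    blade_sign_pga_py (r : Int) (s : Int) = blade_sign_pga_py_alt (r : Int) (s : Int) := by
  decide

-- ===== VERDICT (by name: the statement is the Claim_ definition above) =====
theorem blade_sign_pga_py_spec : Claim_equal_blade_sign_pga_py := by
  intro x y _
  show blade_sign_pga_py x y = blade_sign_pga_py_alt x y
  rw [pv_A_res, pv_B_res]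
  obtain ⟨r, hr, hr16⟩ : ∃ r : Nat, x % 16 = (r : Int) ∧ r < 16 := ⟨(x % 16).toNat, by omega, by omega⟩
  obtain ⟨s, hs, hs8⟩ : ∃ s : Nat, y % 8 = (s : Int) ∧ s < 8 := ⟨(y % 8).toNat, by omega, by omega⟩
  rw [hr, hs]
  exact pv_key r (List.mem_range.mpr hr16) s (List.mem_range.mpr hs8)
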